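-- pv_equiv track=rewrite | github.com/phglab/ARGDIT | ArgditLib/CDSPredict.py | _predict_cds_lens_by_protein_seq
-- ===== SOURCE A (Python) =====
-- def _predict_cds_lens_by_protein_seq(seq_str):
--     orf_complete_cds_len = len(seq_str) * 3
--     complete_cds_len = orf_complete_cds_len + 3
--
--     candidate_cds_lens = set()
--
--     '''i starts from -1 to handle the last amino acid translated from partial codon'''
--     for i in range(-1, 3):
--         candidate_cds_lens.add(orf_complete_cds_len + i)
--         candidate_cds_lens.add(complete_cds_len + i)
--
--     return candidate_cds_lens
-- ===== SOURCE B (Python) =====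
-- def _predict_cds_lens_by_protein_seq(seq_str):
--     base = 3 * len(seq_str)
--
--     def candidates(i, acc):
--         # build the raw candidate-length list back-to-front, from frame
--         # offset i down to -1, prepending the (no-stop, with-stop) pair
--         if i < -1:
--             return acc
--         return candidates(i - 1, [base + i, base + i + 3] + acc)
--
--     return set(candidates(2, []))
-- ===== Notes on version B (the rewrite author's own statement) =====
-- stated objective: alternative
-- what changed: Replaces the forward loop that mutates a set with two .add calls per frame offset by a tail-recursive back-to-front construction (descending offsets, list accumulator with prepend) of the raw candidate list, deduplicated by a single set() pass at the end.
import Mathlib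
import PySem

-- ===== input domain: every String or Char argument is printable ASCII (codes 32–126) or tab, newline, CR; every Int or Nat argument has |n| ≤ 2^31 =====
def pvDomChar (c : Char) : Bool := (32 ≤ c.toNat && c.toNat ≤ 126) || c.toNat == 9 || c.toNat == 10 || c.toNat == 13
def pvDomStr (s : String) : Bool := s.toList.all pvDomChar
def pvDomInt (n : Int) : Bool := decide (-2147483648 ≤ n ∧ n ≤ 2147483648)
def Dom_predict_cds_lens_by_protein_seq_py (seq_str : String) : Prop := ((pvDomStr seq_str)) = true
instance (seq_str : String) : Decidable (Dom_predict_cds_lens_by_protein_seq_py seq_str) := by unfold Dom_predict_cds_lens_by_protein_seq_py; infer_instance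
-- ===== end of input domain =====

-- B replaces A's forward set-accumulator loop by a tail-recursive back-to-front construction of the
-- raw candidate list (descending frame offsets, prepend) followed by one deduplicating set() pass;
-- same returned set.

-- ===== PORT A =====
def predict_cds_lens_by_protein_seq_py (seq_str : String) : List Int :=
  let orf_complete_cds_len : Int := PySem.Str.len seq_str * 3
  let complete_cds_len : Int := orf_complete_cds_len + 3
  let candidate_cds_lens : PySem.Set Int := PySem.Set.empty
  (PySem.List.pyRange (-1) 3 1).foldl
    (fun s i => PySem.Set.add (PySem.Set.add s (orf_complete_cds_len + i)) (complete_cds_len + i))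
    candidate_cds_lens

-- ===== PORT B =====
-- helper: Source B's inner 'candidates(i, acc)' (tail recursion on the descending frame offset)
def pvCandidatesB (base : Int) (i : Int) (acc : List Int) : List Int :=
  if i < -1 then acc
  else pvCandidatesB base (i - 1) ([base + i, base + i + 3] ++ acc)
termination_by (i + 2).toNat
decreasing_by omega

def predict_cds_lens_by_protein_seq_py_alt (seq_str : String) : List Int :=
  let base : Int := 3 * PySem.Str.len seq_str
  PySem.Set.ofList (pvCandidatesB base 2 [])

-- ===== PRECONDITION & SPEC =====
def Spec_predict_cds_lens_by_protein_seq_py (seq_str : String) (out : List Int) : Prop := out = predict_cds_lens_by_protein_seq_py_alt seq_str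
instance (seq_str : String) (out : List Int) : Decidable (Spec_predict_cds_lens_by_protein_seq_py seq_str out) := by unfold Spec_predict_cds_lens_by_protein_seq_py; infer_instance

-- ===== CLAIM (what is proved, stated in full; the proofs are below) =====
def Claim_equal_predict_cds_lens_by_protein_seq_py : Prop := ∀ (seq_str : String), Dom_predict_cds_lens_by_protein_seq_py seq_str → Spec_predict_cds_lens_by_protein_seq_py seq_str (predict_cds_lens_by_protein_seq_py seq_str)

-- ===== LEMMAS AND PROOFS =====
theorem pvRange_m1_3 : PySem.List.pyRange (-1) 3 1 = [-1, 0, 1, 2] := by decide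

-- A's loop, with n = len(seq_str): the set it builds, listed in first-insertion order.
theorem pvFoldA (n : Int) :
    (PySem.List.pyRange (-1) 3 1).foldl
      (fun s i => PySem.Set.add (PySem.Set.add s (n * 3 + i)) (n * 3 + 3 + i)) PySem.Set.empty
    = [n * 3 + -1, n * 3 + 3 + -1, n * 3 + 0, n * 3 + 3 + 0, n * 3 + 1, n * 3 + 3 + 1, n * 3 + 3 + 2] := by
  rw [pvRange_m1_3]
  simp only [List.foldl]
  have h1 : PySem.Set.add (PySem.Set.empty) (n * 3 + -1) = [n * 3 + -1] := by
    rw [PySem.Set.add_of_not_mem (by simp [PySem.Set.empty])]; rfl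
  rw [h1]
  have h2 : PySem.Set.add [n * 3 + -1] (n * 3 + 3 + -1) = [n * 3 + -1, n * 3 + 3 + -1] := by
    rw [PySem.Set.add_of_not_mem (by simp)]; rfl
  rw [h2]
  have h3 : PySem.Set.add [n * 3 + -1, n * 3 + 3 + -1] (n * 3 + 0)
      = [n * 3 + -1, n * 3 + 3 + -1, n * 3 + 0] := by
    rw [PySem.Set.add_of_not_mem (by simp; omega)]; rfl
  rw [h3]
  have h4 : PySem.Set.add [n * 3 + -1, n * 3 + 3 + -1, n * 3 + 0] (n * 3 + 3 + 0)
      = [n * 3 + -1, n * 3 + 3 + -1, n * 3 + 0, n * 3 + 3 + 0] := by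
    rw [PySem.Set.add_of_not_mem (by simp)]; rfl
  rw [h4]
  have h5 : PySem.Set.add [n * 3 + -1, n * 3 + 3 + -1, n * 3 + 0, n * 3 + 3 + 0] (n * 3 + 1)
      = [n * 3 + -1, n * 3 + 3 + -1, n * 3 + 0, n * 3 + 3 + 0, n * 3 + 1] := by
    rw [PySem.Set.add_of_not_mem (by simp; omega)]; rfl
  rw [h5]
  have h6 : PySem.Set.add [n * 3 + -1, n * 3 + 3 + -1, n * 3 + 0, n * 3 + 3 + 0, n * 3 + 1] (n * 3 + 3 + 1)
      = [n * 3 + -1, n * 3 + 3 + -1, n * 3 + 0, n * 3 + 3 + 0, n * 3 + 1, n * 3 + 3 + 1] := by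
    rw [PySem.Set.add_of_not_mem (by simp; omega)]; rfl
  rw [h6]
  have h7 : PySem.Set.add [n * 3 + -1, n * 3 + 3 + -1, n * 3 + 0, n * 3 + 3 + 0, n * 3 + 1, n * 3 + 3 + 1] (n * 3 + 2)
      = [n * 3 + -1, n * 3 + 3 + -1, n * 3 + 0, n * 3 + 3 + 0, n * 3 + 1, n * 3 + 3 + 1] := by
    rw [PySem.Set.add_of_mem (by simp; omega)]
  rw [h7]
  rw [PySem.Set.add_of_not_mem (by simp; omega)]
  rfl

-- B's recursion: the raw candidate list built back-to-front from offset 2.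
theorem pvCandB (b : Int) :
    pvCandidatesB b 2 [] = [b + -1, b + -1 + 3, b + 0, b + 0 + 3, b + 1, b + 1 + 3, b + 2, b + 2 + 3] := by
  rw [pvCandidatesB]; norm_num
  rw [pvCandidatesB]; norm_num
  rw [pvCandidatesB]; norm_num
  rw [pvCandidatesB]; norm_num
  rw [pvCandidatesB]; norm_num

-- B's dedup pass: set() of that raw list, in first-occurrence order.
theorem pvSetB (b : Int) :
    PySem.Set.ofList [b + -1, b + -1 + 3, b + 0, b + 0 + 3, b + 1, b + 1 + 3, b + 2, b + 2 + 3]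
    = [b + -1, b + -1 + 3, b + 0, b + 0 + 3, b + 1, b + 1 + 3, b + 2 + 3] := by
  rw [PySem.Set.ofList_eq_foldl]
  simp only [List.foldl]
  have h1 : PySem.Set.add ([] : List Int) (b + -1) = [b + -1] := by
    rw [PySem.Set.add_of_not_mem (by simp)]; rfl
  rw [h1]
  have h2 : PySem.Set.add [b + -1] (b + -1 + 3) = [b + -1, b + -1 + 3] := by
    rw [PySem.Set.add_of_not_mem (by simp)]; rfl
  rw [h2]
  have h3 : PySem.Set.add [b + -1, b + -1 + 3] (b + 0) = [b + -1, b + -1 + 3, b + 0] := by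
    rw [PySem.Set.add_of_not_mem (by simp; omega)]; rfl
  rw [h3]
  have h4 : PySem.Set.add [b + -1, b + -1 + 3, b + 0] (b + 0 + 3)
      = [b + -1, b + -1 + 3, b + 0, b + 0 + 3] := by
    rw [PySem.Set.add_of_not_mem (by simp)]; rfl
  rw [h4]
  have h5 : PySem.Set.add [b + -1, b + -1 + 3, b + 0, b + 0 + 3] (b + 1)
      = [b + -1, b + -1 + 3, b + 0, b + 0 + 3, b + 1] := by
    rw [PySem.Set.add_of_not_mem (by simp; omega)]; rfl
  rw [h5]
  have h6 : PySem.Set.add [b + -1, b + -1 + 3, b + 0, b + 0 + 3, b + 1] (b + 1 + 3)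
      = [b + -1, b + -1 + 3, b + 0, b + 0 + 3, b + 1, b + 1 + 3] := by
    rw [PySem.Set.add_of_not_mem (by simp; omega)]; rfl
  rw [h6]
  have h7 : PySem.Set.add [b + -1, b + -1 + 3, b + 0, b + 0 + 3, b + 1, b + 1 + 3] (b + 2)
      = [b + -1, b + -1 + 3, b + 0, b + 0 + 3, b + 1, b + 1 + 3] := by
    rw [PySem.Set.add_of_mem (by simp; omega)]
  rw [h7]
  rw [PySem.Set.add_of_not_mem (by simp; omega)]
  rfl

-- ===== VERDICT (by name: the statement is the Claim_ definition above) =====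
theorem predict_cds_lens_by_protein_seq_py_spec : Claim_equal_predict_cds_lens_by_protein_seq_py := by
  intro seq_str _
  unfold Spec_predict_cds_lens_by_protein_seq_py
  unfold predict_cds_lens_by_protein_seq_py predict_cds_lens_by_protein_seq_py_alt
  simp only [pvFoldA, pvCandB, pvSetB]
  simp only [List.cons.injEq, and_true]
  omega
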